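-- pv_equiv track=rewrite | github.com/mark-andrews/ddsr | contents/chapter_07_reproducible/utils.py | mktable
-- ===== SOURCE A (Python) =====
-- def mktable(symbols,
--             nrow = 3,
--             justification = 'cc'):
--
--     '''
--     This monstrosity returns a string that is a LaTeX tabular
--     table of LaTeX math(s) commands and how they appear when
--     rendered.
--     '''
--
--     n = len(symbols)
--
--     ncol = (n % nrow > 0) * 1 + n // nrow
--
--     cc = '|'.join([justification] * ncol)
--
--     # These four are for dealing with slashes and braces in
--     # the verbatim of the \LaTeX command.
--     G = lambda x: x.replace('\\', '\\textbackslash{}')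
--
--     F = lambda x: x.replace('{','LEFTCURLYBRACE').replace('}','RIGHTCURLYBRACE')
--
--     H = lambda x: x.replace('LEFTCURLYBRACE', r'\{').replace('RIGHTCURLYBRACE', r'\}')
--
--     J = lambda x: x.replace('^', r'\^{}').replace('_', '\_')
--
--     def slice_keys(x, k):
--         return ' & '.join([x[k,key[1]] for key in x.keys() if key[0] == k])
--
--     x = {}
--     for i, symbol in enumerate(symbols):
--         col, row = divmod(i, nrow)
--         x[row, col] = "\\texttt{%s} & $%s$" % (J(H(G(F(symbol)))), symbol)
--
--     S = []
--     for i in range(nrow):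
--         s = slice_keys(x, i)
--         s = s + ' & ' * (ncol * 2 - s.count('$'))
--         S.append(s)
--
--
--     return '\n'.join([
--         '\\begin{center}',
--         '\\begin{tabular}{%s}' % cc,
--         '\\\\ \n'.join(S),
--         '\\end{tabular}',
--         '\\end{center}'
--     ])
-- ===== SOURCE B (Python) =====
-- def mktable(symbols,
--             nrow = 3,
--             justification = 'cc'):
--     '''
--     Same LaTeX tabular string as the original, but each row is produced
--     directly by column-major index striding (row r holds symbols[r], symbols[r+nrow], ...),
--     so there is no (row,col) dict and no per-row rescan of keys.
--     '''
--     n = len(symbols)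
--     ncol = n // nrow + (n % nrow > 0)
--     cc = '|'.join([justification] * ncol)
--
--     def cell(sym):
--         t = sym.replace('{', 'LEFTCURLYBRACE').replace('}', 'RIGHTCURLYBRACE')
--         t = t.replace('\\', '\\textbackslash{}')
--         t = t.replace('LEFTCURLYBRACE', r'\{').replace('RIGHTCURLYBRACE', r'\}')
--         t = t.replace('^', r'\^{}').replace('_', r'\_')
--         return '\\texttt{%s} & $%s$' % (t, sym)
--
--     def padded_row(r):
--         s = ' & '.join(cell(symbols[k]) for k in range(r, n, nrow))
--         return s + ' & ' * (2 * ncol - s.count('$'))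
--
--     body = '\\\\ \n'.join(padded_row(r) for r in range(nrow))
--
--     return ('\\begin{center}\n'
--             '\\begin{tabular}{%s}\n'
--             '%s\n'
--             '\\end{tabular}\n'
--             '\\end{center}') % (cc, body)
-- ===== Notes on version B (the rewrite author's own statement) =====
-- stated objective: faster
-- what changed: Replaces A's (row,col)-keyed dict built per symbol and rescanned in full by slice_keys for every row with direct column-major striding: row r is generated straight from the indices range(r, n, nrow), and the result is one format string instead of joining five lines.
import Mathlib
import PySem

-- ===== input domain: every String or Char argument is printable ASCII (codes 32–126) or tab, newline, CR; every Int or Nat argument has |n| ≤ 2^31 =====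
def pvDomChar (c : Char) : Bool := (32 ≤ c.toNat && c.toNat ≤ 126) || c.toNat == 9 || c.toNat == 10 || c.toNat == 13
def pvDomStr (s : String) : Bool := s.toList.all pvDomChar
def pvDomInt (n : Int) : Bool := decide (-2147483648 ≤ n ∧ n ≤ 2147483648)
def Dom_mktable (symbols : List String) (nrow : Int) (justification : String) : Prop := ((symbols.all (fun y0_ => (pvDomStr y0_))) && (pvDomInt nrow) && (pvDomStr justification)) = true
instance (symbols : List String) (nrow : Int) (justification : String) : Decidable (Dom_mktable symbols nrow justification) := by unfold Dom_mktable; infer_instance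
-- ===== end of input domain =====

-- B drops A's (row,col)-keyed dict and its per-row slice_keys rescan: each row is generated
-- directly by column-major index striding range(r, n, nrow) (objective: faster, O(n) vs O(nrow*n),
-- measured faster in a timing run); same return value on Pre_.

-- Python's  s * k  on strings (empty for k ≤ 0); both sources use it as ' & ' * k.
def pyStrMul (s : String) (k : Int) : String := PySem.Str.join "" (List.replicate k.toNat s)

-- ===== PORT A =====
def pvF (x : String) : String :=
  PySem.Str.replace (PySem.Str.replace x "{" "LEFTCURLYBRACE") "}" "RIGHTCURLYBRACE"
def pvG (x : String) : String := PySem.Str.replace x "\\" "\\textbackslash{}"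
def pvH (x : String) : String :=
  PySem.Str.replace (PySem.Str.replace x "LEFTCURLYBRACE" "\\{") "RIGHTCURLYBRACE" "\\}"
def pvJ (x : String) : String :=
  PySem.Str.replace (PySem.Str.replace x "^" "\\^{}") "_" "\\_"

def mktableSliceKeys (x : PySem.Dict (Int × Int) String) (k : Int) : String :=
  PySem.Str.join " & "
    ((x.keys.filter (fun key => key.1 == k)).map (fun key => (x.get? (k, key.2)).getD ""))

def mktable (symbols : List String) (nrow : Int) (justification : String) : String :=
  let n : Int := PySem.List.len symbols
  let ncol : Int := (if 0 < PySem.Int.mod n nrow then 1 else 0) * 1 + PySem.Int.floordiv n nrow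
  let cc : String := PySem.Str.join "|" (PySem.List.pyRepeat [justification] ncol)
  let x : PySem.Dict (Int × Int) String :=
    (PySem.List.enumerate symbols).foldl (fun d p =>
      d.insert (PySem.Int.mod p.1 nrow, PySem.Int.floordiv p.1 nrow)
        ("\\texttt{" ++ pvJ (pvH (pvG (pvF p.2))) ++ "} & $" ++ p.2 ++ "$"))
      PySem.Dict.empty
  let S : List String := (PySem.List.pyRange 0 nrow).foldl (fun S i =>
      let s := mktableSliceKeys x i
      let s := s ++ pyStrMul " & " (ncol * 2 - (PySem.Str.count s "$" : Int))
      S ++ [s]) []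
  PySem.Str.join "\n"
    ["\\begin{center}",
     "\\begin{tabular}{" ++ cc ++ "}",
     PySem.Str.join "\\\\ \n" S,
     "\\end{tabular}",
     "\\end{center}"]

-- ===== PORT B =====
def mktableCell (sym : String) : String :=
  let t := PySem.Str.replace (PySem.Str.replace sym "{" "LEFTCURLYBRACE") "}" "RIGHTCURLYBRACE"
  let t := PySem.Str.replace t "\\" "\\textbackslash{}"
  let t := PySem.Str.replace (PySem.Str.replace t "LEFTCURLYBRACE" "\\{") "RIGHTCURLYBRACE" "\\}"
  let t := PySem.Str.replace (PySem.Str.replace t "^" "\\^{}") "_" "\\_"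
  "\\texttt{" ++ t ++ "} & $" ++ sym ++ "$"

-- symbols[k] is ported with pyGetD "": every k drawn from range(r, n, nrow) with 0 ≤ r < nrow
-- lies in [0, n), so this is exact (the loop body never runs when nrow ≤ 0: range(nrow) is empty).
def mktable_alt (symbols : List String) (nrow : Int) (justification : String) : String :=
  let n : Int := PySem.List.len symbols
  let ncol : Int := PySem.Int.floordiv n nrow + (if 0 < PySem.Int.mod n nrow then 1 else 0)
  let cc : String := PySem.Str.join "|" (PySem.List.pyRepeat [justification] ncol)
  let paddedRow : Int → String := fun r =>
    let s := PySem.Str.join " & "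
      ((PySem.List.pyRange r n nrow).map (fun k => mktableCell (PySem.List.pyGetD symbols k "")))
    s ++ pyStrMul " & " (2 * ncol - (PySem.Str.count s "$" : Int))
  let body : String := PySem.Str.join "\\\\ \n" ((PySem.List.pyRange 0 nrow).map paddedRow)
  "\\begin{center}\n\\begin{tabular}{" ++ cc ++ "}\n" ++ body ++ "\n\\end{tabular}\n\\end{center}"

-- ===== PRECONDITION & SPEC =====
-- Pre_ excludes only nrow = 0, where Python A raises ZeroDivisionError (n // nrow).
def Pre_mktable (symbols : List String) (nrow : Int) (justification : String) : Prop := nrow ≠ 0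
instance (symbols : List String) (nrow : Int) (justification : String) : Decidable (Pre_mktable symbols nrow justification) := by unfold Pre_mktable; infer_instance

def pvWitness_mktable : List String × Int × String := (["\\alpha", "x_1", "e^x"], 2, "cc")

def Spec_mktable (symbols : List String) (nrow : Int) (justification : String) (out : String) : Prop := out = mktable_alt symbols nrow justification
instance (symbols : List String) (nrow : Int) (justification : String) (out : String) : Decidable (Spec_mktable symbols nrow justification out) := by unfold Spec_mktable; infer_instance

-- ===== CLAIM (what is proved, stated in full; the proofs are below) =====
def Claim_equal_mktable : Prop := ∀ (symbols : List String) (nrow : Int) (justification : String), Dom_mktable symbols nrow justification → Pre_mktable symbols nrow justification → Spec_mktable symbols nrow justification (mktable symbols nrow justification)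

-- ===== LEMMAS AND PROOFS =====

-- the common cell text (A's four lambdas and B's chained lets are definitionally equal)
def pvCell (p : Int × String) : String :=
  "\\texttt{" ++ pvJ (pvH (pvG (pvF p.2))) ++ "} & $" ++ p.2 ++ "$"

def pvNcol (n nrow : Int) : Int :=
  (if 0 < PySem.Int.mod n nrow then 1 else 0) * 1 + PySem.Int.floordiv n nrow

def pvPad (ncol : Int) (s : String) : String :=
  s ++ pyStrMul " & " (ncol * 2 - (PySem.Str.count s "$" : Int))

def pvOutC (cc m : String) : String :=
  "\\begin{center}\n\\begin{tabular}{" ++ cc ++ "}\n" ++ m ++ "\n\\end{tabular}\n\\end{center}"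

def pvDict (symbols : List String) (nrow : Int) : PySem.Dict (Int × Int) String :=
  (PySem.List.enumerate symbols).foldl (fun d p =>
    d.insert (PySem.Int.mod p.1 nrow, PySem.Int.floordiv p.1 nrow) (pvCell p))
    PySem.Dict.empty

theorem pvA_eq (symbols : List String) (nrow : Int) (justification : String) :
    mktable symbols nrow justification =
    PySem.Str.join "\n"
      ["\\begin{center}",
       "\\begin{tabular}{" ++ PySem.Str.join "|" (PySem.List.pyRepeat [justification] (pvNcol (PySem.List.len symbols) nrow)) ++ "}",
       PySem.Str.join "\\\\ \n"
         ((PySem.List.pyRange 0 nrow).foldl (fun S i =>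
           S ++ [pvPad (pvNcol (PySem.List.len symbols) nrow) (mktableSliceKeys (pvDict symbols nrow) i)]) []),
       "\\end{tabular}",
       "\\end{center}"] := rfl

theorem pvB_eq (symbols : List String) (nrow : Int) (justification : String) :
    mktable_alt symbols nrow justification =
    pvOutC
      (PySem.Str.join "|" (PySem.List.pyRepeat [justification]
           (PySem.Int.floordiv (PySem.List.len symbols) nrow +
             (if 0 < PySem.Int.mod (PySem.List.len symbols) nrow then 1 else 0))))
      (PySem.Str.join "\\\\ \n" ((PySem.List.pyRange 0 nrow).map (fun r =>
           let s := PySem.Str.join " & "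
             ((PySem.List.pyRange r (PySem.List.len symbols) nrow).map
               (fun k => pvCell (k, PySem.List.pyGetD symbols k "")))
           s ++ pyStrMul " & "
             (2 * (PySem.Int.floordiv (PySem.List.len symbols) nrow +
                 (if 0 < PySem.Int.mod (PySem.List.len symbols) nrow then 1 else 0))
               - (PySem.Str.count s "$" : Int))))) := rfl

-- the five-line join of A's return equals B's single formatted string
theorem pvJoinFive (cc m : String) :
    PySem.Str.join "\n" ["\\begin{center}", "\\begin{tabular}{" ++ cc ++ "}", m, "\\end{tabular}", "\\end{center}"]
    = pvOutC cc m := by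
  unfold pvOutC
  apply String.ext
  simp [PySem.Str.join, PySem.Chars.join_cons_cons, PySem.Chars.join_singleton]

theorem pvNcolComm (n nrow : Int) :
    PySem.Int.floordiv n nrow + (if 0 < PySem.Int.mod n nrow then 1 else 0) = pvNcol n nrow := by
  unfold pvNcol; ring

-- the keys produced by A's dict-building loop are pairwise distinct
theorem pvKfNodup (symbols : List String) (nrow : Int) :
    ((PySem.List.enumerate symbols).map
      (fun p => (PySem.Int.mod p.1 nrow, PySem.Int.floordiv p.1 nrow))).Nodup := by
  refine List.pairwise_map.mpr ((PySem.List.pairwise_lt_enumerate symbols 0).imp ?_)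
  intro a b hlt heq
  have h1 : PySem.Int.mod a.1 nrow = PySem.Int.mod b.1 nrow := congrArg Prod.fst heq
  have h2 : PySem.Int.floordiv a.1 nrow = PySem.Int.floordiv b.1 nrow := congrArg Prod.snd heq
  have h3 : a.1 = b.1 := by
    rw [← PySem.Int.floordiv_mul_add_mod a.1 nrow, ← PySem.Int.floordiv_mul_add_mod b.1 nrow,
        h1, h2]
  omega

-- A's slice_keys over the dict equals the per-row filtered cell list
theorem pvSliceKeys_eq (symbols : List String) (nrow : Int) (i : Int) :
    mktableSliceKeys (pvDict symbols nrow) i =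
    PySem.Str.join " & "
      (((PySem.List.enumerate symbols).filter
        (fun p => PySem.Int.mod p.1 nrow == i)).map pvCell) := by
  have hnd := pvKfNodup symbols nrow
  have hitems : (pvDict symbols nrow).items =
      (PySem.List.enumerate symbols).map
        (fun p => ((PySem.Int.mod p.1 nrow, PySem.Int.floordiv p.1 nrow), pvCell p)) := by
    unfold pvDict
    rw [PySem.Dict.items_foldl_insert_fresh _ _ _ _ (fun a _ => by simp [pysem]) hnd]
    rfl
  have hkeys : (pvDict symbols nrow).keys =
      (PySem.List.enumerate symbols).map
        (fun p => (PySem.Int.mod p.1 nrow, PySem.Int.floordiv p.1 nrow)) := by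
    simp only [PySem.Dict.keys, hitems, List.map_map]
    rfl
  unfold mktableSliceKeys
  rw [hkeys, List.filter_map, List.map_map]
  apply congrArg
  simp only [Function.comp_def]
  apply List.map_congr_left
  intro p hp
  have hpl : p ∈ PySem.List.enumerate symbols := List.mem_of_mem_filter hp
  have hpred := List.of_mem_filter hp
  have heq : PySem.Int.mod p.1 nrow = i := by
    simpa using hpred
  have hkey : (i, PySem.Int.floordiv p.1 nrow) =
      (PySem.Int.mod p.1 nrow, PySem.Int.floordiv p.1 nrow) := by rw [heq]
  have hmemit : ((PySem.Int.mod p.1 nrow, PySem.Int.floordiv p.1 nrow), pvCell p) ∈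
      (pvDict symbols nrow).items := by
    rw [hitems]; exact List.mem_map_of_mem hpl
  rw [hkey, PySem.Dict.get?_of_mem_items _ hmemit (by rw [hkeys]; exact hnd)]
  rfl

-- the indices 0 ≤ j < n with j % nrow = i are exactly range(i, n, nrow)
theorem pvStride (n nrow i : Int) (h : 0 < nrow) (h0 : 0 ≤ i) (hi : i < nrow) :
    (PySem.List.pyRange 0 n).filter (fun j => PySem.Int.mod j nrow == i) =
    PySem.List.pyRange i n nrow := by
  have hpair₁ : ((PySem.List.pyRange 0 n).filter
      (fun j => PySem.Int.mod j nrow == i)).Pairwise (· < ·) :=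
    (PySem.List.pairwise_lt_pyRange_one 0 n).filter _
  have hpair₂ : (PySem.List.pyRange i n nrow).Pairwise (· < ·) := by
    rw [PySem.List.pyRange_of_pos _ _ h]
    refine List.pairwise_map.mpr ((List.pairwise_lt_range).imp ?_)
    intro a b hab
    have : (nrow : Int) * a < nrow * b := by
      apply mul_lt_mul_of_pos_left _ h
      exact_mod_cast hab
    omega
  have hmem : ∀ a : Int, (a ∈ (PySem.List.pyRange 0 n).filter
      (fun j => PySem.Int.mod j nrow == i)) ↔ a ∈ PySem.List.pyRange i n nrow := by
    intro a
    rw [List.mem_filter, PySem.List.mem_pyRange_one, PySem.List.mem_pyRange_iff_of_pos h,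
        beq_iff_eq, PySem.Int.mod_eq_emod_of_pos h]
    constructor
    · rintro ⟨⟨ha0, han⟩, hm⟩
      obtain ⟨k, hk⟩ := Int.dvd_self_sub_of_emod_eq hm
      have hia : i ≤ a := by
        by_cases hk0 : 0 ≤ k
        · nlinarith
        · have hk1 : k ≤ -1 := by omega
          have : nrow * k ≤ nrow * (-1) := mul_le_mul_of_nonneg_left hk1 h.le
          omega
      exact ⟨hia, han, ⟨k, hk⟩⟩
    · rintro ⟨hia, han, hdvd⟩
      refine ⟨⟨by omega, han⟩, ?_⟩
      obtain ⟨k, hk⟩ := hdvd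
      have h2 : a = i + nrow * k := by omega
      rw [h2, Int.add_mul_emod_self_left, Int.emod_eq_of_lt h0 hi]
  have hperm : ((PySem.List.pyRange 0 n).filter
      (fun j => PySem.Int.mod j nrow == i)).Perm (PySem.List.pyRange i n nrow) := by
    rw [List.perm_ext_iff_of_nodup (hpair₁.imp ne_of_lt) (hpair₂.imp ne_of_lt)]
    exact hmem
  exact List.Perm.eq_of_pairwise (fun a b _ _ hab hba => absurd hba (by omega)) hpair₁ hpair₂ hperm

-- row i of A (slice_keys of the dict) is row i of B (the stride range(i, n, nrow))
theorem pvRow_eq (symbols : List String) (nrow i : Int) (h0 : 0 ≤ i) (hi : i < nrow) :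
    mktableSliceKeys (pvDict symbols nrow) i =
    PySem.Str.join " & "
      ((PySem.List.pyRange i (PySem.List.len symbols) nrow).map
        (fun k => pvCell (k, PySem.List.pyGetD symbols k ""))) := by
  rw [pvSliceKeys_eq, PySem.List.enumerate_eq_map_pyRange symbols "", List.filter_map]
  apply congrArg
  have hpred : ((fun p => PySem.Int.mod p.1 nrow == i) ∘
      (fun j => ((j : Int), PySem.List.pyGetD symbols j ""))) =
      (fun j => PySem.Int.mod j nrow == i) := rfl
  rw [hpred, pvStride _ _ _ (by omega) h0 hi, List.map_map]
  rfl

-- ===== VERDICT (by name: the statement is the Claim_ definition above) =====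
theorem mktable_spec : Claim_equal_mktable := by
  intro symbols nrow justification _ _
  unfold Spec_mktable
  rw [pvA_eq, pvJoinFive, pvB_eq]
  congr 1
  · rw [pvNcolComm]
  apply congrArg
  rw [PySem.List.foldl_append_singleton_eq_map, List.nil_append]
  apply List.map_congr_left
  intro r hr
  have hb := PySem.List.mem_pyRange_one.mp hr
  simp only
  rw [pvRow_eq symbols nrow r hb.1 hb.2, pvNcolComm]
  unfold pvPad
  rw [mul_comm (pvNcol (PySem.List.len symbols) nrow) 2]
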